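-- pv_equiv track=rewrite | github.com/Scantlin/ICT-Programming | Class_Challenge.py | sorting
-- ===== SOURCE A (Python) =====
-- number = 117
--
-- i = 3
--
-- def sorting(s:str):
--     sorting = []
--     number = []
--     number_odd = []
--     number_even = []
--
--     for i in range(len(s)):
--         if s[i].islower():
--             sorting.append(s[i])
--     sorting = sorted(sorting)
--     for i in range(len(s)):
--         if s[i].isupper():
--             sorting.append(s[i])
--     for i in range(len(s)):
--         if s[i].isnumeric():
--             number.append(s[i])
--     numbers_check = list(map(int, number))
--
--     for i in range(len(numbers_check)):
--         if numbers_check[i] % 2 != 0 and numbers_check[i] != 0: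
--             number_odd.append(str(numbers_check[i]))
--
--     for i in range(len(numbers_check)):
--         if numbers_check[i] % 2 == 0:
--             number_even.append(str(numbers_check[i]))
--
--     number_even = sorted(number_even)
--
--     output = sorting + number_odd  + number_even
--
--     return ''.join(output)
-- ===== SOURCE B (Python) =====
-- def sorting(s: str):
--     lower, upper, odd, even = [], [], [], []
--     for c in s:
--         if c.islower():
--             lower.append(c)
--         elif c.isupper():
--             upper.append(c)
--         elif c.isnumeric():
--             n = int(c)
--             if n % 2 != 0:
--                 odd.append(str(n))
--             else:
--                 even.append(str(n))
--     return ''.join(sorted(lower) + upper + odd + sorted(even))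
-- ===== Notes on version B (the rewrite author's own statement) =====
-- stated objective: simpler
-- what changed: A scans the string five times (lowercase pass, uppercase pass, digit pass, then two more passes over the collected digits); B classifies each character once into four buckets in a single pass and joins sorted(lower)+upper+odd+sorted(even).
import Mathlib
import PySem

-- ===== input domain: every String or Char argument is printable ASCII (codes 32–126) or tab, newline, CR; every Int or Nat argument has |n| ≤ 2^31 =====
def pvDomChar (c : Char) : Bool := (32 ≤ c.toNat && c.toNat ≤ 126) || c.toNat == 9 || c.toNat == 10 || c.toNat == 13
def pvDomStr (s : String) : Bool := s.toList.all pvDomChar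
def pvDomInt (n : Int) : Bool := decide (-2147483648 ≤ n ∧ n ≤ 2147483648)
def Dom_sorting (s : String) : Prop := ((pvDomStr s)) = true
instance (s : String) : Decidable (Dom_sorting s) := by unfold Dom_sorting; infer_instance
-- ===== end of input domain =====

-- B replaces A's five separate scans of the string by one classifying pass into four
-- buckets (objective: simpler — one traversal and one branch chain instead of five loops).

-- ===== PORT A =====
-- Exactness notes: on this ASCII domain c.isnumeric() coincides with c.isdigit(), and
-- int(c) on a char that passed that test never raises, so `(PySem.Int.ofChars? [c]).getD 0`
-- is exact there (the default 0 is unreachable).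
def sorting (s : String) : String :=
  let cs := s.toList
  let sorting1 := (PySem.List.pyRange 0 (cs.length : Int) 1).foldl
    (fun acc i => if PySem.Chars.islower (PySem.List.pyGetD cs i ' ') then
        acc ++ [PySem.List.pyGetD cs i ' '] else acc) []
  let sorting2 := PySem.List.sorted sorting1 (fun x => x) false
  let sorting3 := (PySem.List.pyRange 0 (cs.length : Int) 1).foldl
    (fun acc i => if PySem.Chars.isupper (PySem.List.pyGetD cs i ' ') then
        acc ++ [PySem.List.pyGetD cs i ' '] else acc) sorting2
  let number := (PySem.List.pyRange 0 (cs.length : Int) 1).foldl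
    (fun acc i => if PySem.Chars.isdigit (PySem.List.pyGetD cs i ' ') then
        acc ++ [PySem.List.pyGetD cs i ' '] else acc) ([] : List Char)
  let numbersCheck := number.map (fun c => (PySem.Int.ofChars? [c]).getD 0)
  let numberOdd := (PySem.List.pyRange 0 (numbersCheck.length : Int) 1).foldl
    (fun acc i => if PySem.Int.mod (PySem.List.pyGetD numbersCheck i 0) 2 != 0 &&
          PySem.List.pyGetD numbersCheck i 0 != 0 then
        acc ++ [PySem.Int.toChars (PySem.List.pyGetD numbersCheck i 0)] else acc)
    ([] : List (List Char))
  let numberEven := (PySem.List.pyRange 0 (numbersCheck.length : Int) 1).foldl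
    (fun acc i => if PySem.Int.mod (PySem.List.pyGetD numbersCheck i 0) 2 == 0 then
        acc ++ [PySem.Int.toChars (PySem.List.pyGetD numbersCheck i 0)] else acc)
    ([] : List (List Char))
  let numberEven2 := PySem.List.sorted numberEven (fun x => x) false
  let output := sorting3.map (fun c => [c]) ++ numberOdd ++ numberEven2
  String.ofList (PySem.Chars.join [] output)

-- ===== PORT B =====
-- int(c) and str(int(c)) on a single char (shared by port B and the proofs)
def chInt (c : Char) : Int := (PySem.Int.ofChars? [c]).getD 0
def chStr (c : Char) : List Char := PySem.Int.toChars (chInt c)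

-- one classifying step per character: lowercase, uppercase, odd digit, even digit
def sortingAltStep (st : List Char × List Char × List (List Char) × List (List Char))
    (c : Char) : List Char × List Char × List (List Char) × List (List Char) :=
  let (lo, up, od, ev) := st
  if PySem.Chars.islower c then (lo ++ [c], up, od, ev)
  else if PySem.Chars.isupper c then (lo, up ++ [c], od, ev)
  else if PySem.Chars.isdigit c then
    if PySem.Int.mod (chInt c) 2 != 0 then (lo, up, od ++ [chStr c], ev)
    else (lo, up, od, ev ++ [chStr c])
  else (lo, up, od, ev)

def sorting_alt (s : String) : String :=
  let r := s.toList.foldl sortingAltStep ([], [], [], [])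
  String.ofList (PySem.Chars.join []
    ((PySem.List.sorted r.1 (fun x => x) false ++ r.2.1).map (fun c => [c]) ++ r.2.2.1 ++
      PySem.List.sorted r.2.2.2 (fun x => x) false))

-- ===== PRECONDITION & SPEC =====
def Spec_sorting (s : String) (out : String) : Prop := out = sorting_alt s
instance (s : String) (out : String) : Decidable (Spec_sorting s out) := by unfold Spec_sorting; infer_instance

-- ===== CLAIM (what is proved, stated in full; the proofs are below) =====
def Claim_equal_sorting : Prop := ∀ (s : String), Dom_sorting s → Spec_sorting s (sorting s)

-- ===== LEMMAS AND PROOFS =====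

-- B's effective bucket predicates (its elif chain made explicit)
def pUp (c : Char) : Bool := !PySem.Chars.islower c && PySem.Chars.isupper c
def pOdd (c : Char) : Bool :=
  !PySem.Chars.islower c && !PySem.Chars.isupper c && PySem.Chars.isdigit c &&
    (PySem.Int.mod (chInt c) 2 != 0)
def pEv (c : Char) : Bool :=
  !PySem.Chars.islower c && !PySem.Chars.isupper c && PySem.Chars.isdigit c &&
    !(PySem.Int.mod (chInt c) 2 != 0)

theorem not_upper_of_lower (c : Char) (h : PySem.Chars.islower c = true) :
    PySem.Chars.isupper c = false := by
  simp [PySem.Chars.islower, PySem.Chars.isupper, Char.le_def, UInt32.le_iff_toNat_le] at *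
  omega

theorem not_lower_of_digit (c : Char) (h : PySem.Chars.isdigit c = true) :
    PySem.Chars.islower c = false := by
  simp [PySem.Chars.islower, PySem.Chars.isdigit, Char.le_def, UInt32.le_iff_toNat_le] at *
  omega

theorem not_upper_of_digit (c : Char) (h : PySem.Chars.isdigit c = true) :
    PySem.Chars.isupper c = false := by
  simp [PySem.Chars.isupper, PySem.Chars.isdigit, Char.le_def, UInt32.le_iff_toNat_le] at *
  omega

-- B's fold computes the four filtered buckets appended to the running state
theorem altStep_foldl (cs : List Char) (lo up : List Char) (od ev : List (List Char)) :
    cs.foldl sortingAltStep (lo, up, od, ev) =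
      (lo ++ cs.filter PySem.Chars.islower, up ++ cs.filter pUp,
       od ++ (cs.filter pOdd).map chStr, ev ++ (cs.filter pEv).map chStr) := by
  induction cs generalizing lo up od ev with
  | nil => simp
  | cons c cs ih =>
    simp only [List.foldl_cons, List.filter_cons]
    by_cases h1 : PySem.Chars.islower c = true
    · simp [sortingAltStep, pUp, pOdd, pEv, h1, ih, List.append_assoc]
    · by_cases h2 : PySem.Chars.isupper c = true
      · simp [sortingAltStep, pUp, pOdd, pEv, h1, h2, ih, List.append_assoc]
      · by_cases h3 : PySem.Chars.isdigit c = true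
        · by_cases h4 : chInt c % 2 = 1
          · simp [sortingAltStep, pUp, pOdd, pEv, h1, h2, h3, h4, ih, List.append_assoc]
          · have h5 : (2:Int) ∣ chInt c := by omega
            simp [sortingAltStep, pUp, pOdd, pEv, h1, h2, h3, h5, ih, List.append_assoc]
        · simp [sortingAltStep, pUp, pOdd, pEv, h1, h2, h3, ih]

-- the elif guards are redundant: lower/upper/digit are mutually exclusive
theorem pUp_eq (cs : List Char) : cs.filter pUp = cs.filter PySem.Chars.isupper := by
  refine List.filter_congr (fun c _ => ?_)
  unfold pUp
  cases h : PySem.Chars.islower c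
  · simp
  · simp [not_upper_of_lower c h]

theorem pOdd_eq (cs : List Char) :
    cs.filter pOdd = cs.filter (fun c =>
      (PySem.Int.mod (chInt c) 2 != 0 && chInt c != 0) && PySem.Chars.isdigit c) := by
  refine List.filter_congr (fun c _ => ?_)
  unfold pOdd
  cases h3 : PySem.Chars.isdigit c
  · simp
  · simp [not_lower_of_digit c h3, not_upper_of_digit c h3]
    omega

theorem pEv_eq (cs : List Char) :
    cs.filter pEv = cs.filter (fun c =>
      (PySem.Int.mod (chInt c) 2 == 0) && PySem.Chars.isdigit c) := by
  refine List.filter_congr (fun c _ => ?_)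
  unfold pEv
  cases h3 : PySem.Chars.isdigit c
  · simp
  · simp only [bne, Bool.not_not]
    simp [not_lower_of_digit c h3, not_upper_of_digit c h3]

-- a filter over the mapped ints is a char-level filter under the map
theorem digit_filter_map (cs : List Char) (p : Int → Bool) :
    (((cs.filter PySem.Chars.isdigit).map chInt).filter p).map PySem.Int.toChars =
      (cs.filter (fun c => p (chInt c) && PySem.Chars.isdigit c)).map chStr := by
  rw [List.filter_map, List.map_map, List.filter_filter]
  simp [chStr, Function.comp]

theorem sorting_eq_alt (s : String) : sorting s = sorting_alt s := by
  unfold sorting sorting_alt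
  dsimp only
  rw [PySem.List.foldl_pyRange_zero_pyGetD' s.toList ' '
      (fun acc c => if PySem.Chars.islower c then acc ++ [c] else acc),
    PySem.List.foldl_pyRange_zero_pyGetD' s.toList ' '
      (fun acc c => if PySem.Chars.isupper c then acc ++ [c] else acc),
    PySem.List.foldl_pyRange_zero_pyGetD' s.toList ' '
      (fun acc c => if PySem.Chars.isdigit c then acc ++ [c] else acc)]
  rw [PySem.List.foldl_pyRange_zero_pyGetD' _ 0
      (fun acc n => if PySem.Int.mod n 2 != 0 && n != 0 then
        acc ++ [PySem.Int.toChars n] else acc),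
    PySem.List.foldl_pyRange_zero_pyGetD' _ 0
      (fun acc n => if PySem.Int.mod n 2 == 0 then
        acc ++ [PySem.Int.toChars n] else acc)]
  rw [PySem.List.foldl_append_if_eq_filter, PySem.List.foldl_append_if_eq_filter,
    PySem.List.foldl_append_if_eq_filter]
  rw [PySem.List.foldl_append_if (fun n => PySem.Int.mod n 2 != 0 && n != 0) PySem.Int.toChars,
    PySem.List.foldl_append_if (fun n => PySem.Int.mod n 2 == 0) PySem.Int.toChars]
  rw [altStep_foldl]
  simp only [List.nil_append]
  rw [pUp_eq, pOdd_eq, pEv_eq]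
  rw [show (fun c => (PySem.Int.ofChars? [c]).getD 0) = chInt from rfl]
  rw [digit_filter_map s.toList (fun n => PySem.Int.mod n 2 != 0 && n != 0),
    digit_filter_map s.toList (fun n => PySem.Int.mod n 2 == 0)]

-- ===== VERDICT (by name: the statement is the Claim_ definition above) =====
theorem sorting_spec : Claim_equal_sorting := by
  intro s _
  unfold Spec_sorting
  exact sorting_eq_alt s
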